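-- pv_equiv track=rewrite | github.com/tycyd/codeforces | math/modular/1394A Boboniu Chats with Du.py | Boboniu_Chats_with_Du
-- ===== SOURCE A (Python) =====
-- def Boboniu_Chats_with_Du(n, d, m, a_a):
--
--     b_a = []
--     c_a = []
--     res = 0
--
--     for a in a_a:
--         if a > m:
--             b_a.append(a)
--         else:
--             c_a.append(a)
--             res += a
--
--     if not b_a:
--         return res
--
--     b_a.sort(reverse=True)
--     c_a.sort()
--
--     d += 1
--     blen = len(b_a)
--     bidx = (blen // d) + (1 if blen % d > 0 else 0)
--     cidx = 0
--
--     for i in range(bidx):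
--         res += b_a[i]
--
--     while bidx < len(b_a):
--         if blen % d == 0:
--             blen2 = blen + 1
--         else:
--             blen2 = (blen // d + 1) * d + 1
--
--         if cidx + blen2 - blen > len(c_a):
--             break
--
--         csum = 0
--         for i in range(cidx, cidx + blen2 - blen):
--             csum += c_a[i]
--             cidx += 1
--
--         if csum >= b_a[bidx]:
--             break
--
--         res += b_a[bidx] - csum
--         bidx += 1
--         blen = blen2
--
--     return res
-- ===== SOURCE B (Python) =====
-- def Boboniu_Chats_with_Du(n, d, m, a_a):
--     # enumeration over the number k of big (>m) entries taken, via prefix sums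
--     big = sorted((a for a in a_a if a > m), reverse=True)
--     small = sorted(a for a in a_a if a <= m)
--     pb = [0]
--     for x in big:
--         pb.append(pb[-1] + x)
--     ps = [0]
--     for x in small:
--         ps.append(ps[-1] + x)
--     total_small = ps[-1]
--     if not big:
--         return total_small
--     dd = d + 1
--     blen, clen = len(big), len(small)
--     k0 = -(-blen // dd)  # minimum number of bigs A ever takes
--     best = None
--     for k in range(k0, blen + 1):
--         removed = max(0, (k - 1) * dd + 1 - blen)  # smalls whose day a big steals
--         if removed > clen:
--             break
--         cand = pb[k] + total_small - ps[removed]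
--         if best is None or cand > best:
--             best = cand
--     return best
-- ===== Notes on version B (the rewrite author's own statement) =====
-- stated objective: alternative
-- what changed: A's incremental pointer-advancing greedy (mutable bidx/cidx/blen state, inner loop re-summing smalls each step) is replaced by an explicit enumeration over the number k of big (>m) entries taken, using prefix sums of the descending-sorted bigs and ascending-sorted smalls and returning the maximum candidate over all feasible k.
-- outside the precondition, e.g. on Boboniu_Chats_with_Du(3, -2, 0, [5, 1, -1]): A returns 5, B returns None; on Boboniu_Chats_with_Du(3, -1, 0, [5, 1]): A raises ZeroDivisionError, B raises ZeroDivisionError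
import Mathlib
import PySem

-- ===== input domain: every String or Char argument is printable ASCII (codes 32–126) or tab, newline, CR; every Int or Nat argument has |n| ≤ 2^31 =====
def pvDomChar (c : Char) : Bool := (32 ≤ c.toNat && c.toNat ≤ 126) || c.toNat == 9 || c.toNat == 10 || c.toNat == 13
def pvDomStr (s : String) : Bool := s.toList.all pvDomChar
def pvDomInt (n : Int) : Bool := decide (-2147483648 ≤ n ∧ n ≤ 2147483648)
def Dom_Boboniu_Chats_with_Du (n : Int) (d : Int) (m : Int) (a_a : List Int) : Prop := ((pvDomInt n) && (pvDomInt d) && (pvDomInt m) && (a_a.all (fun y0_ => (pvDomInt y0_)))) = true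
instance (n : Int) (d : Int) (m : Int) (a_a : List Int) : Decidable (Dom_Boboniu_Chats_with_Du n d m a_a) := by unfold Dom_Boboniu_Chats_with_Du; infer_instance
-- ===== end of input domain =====

-- B replaces A's pointer-advancing greedy by a prefix-sum enumeration over the number of big
-- (>m) entries taken, returning the maximum candidate; same O(n log n) cost, different algorithm.
-- Pre_ restricts d to d ≥ 0 (d is a count of muzzled days, the task's natural domain): for
-- d = -1 A raises ZeroDivisionError, and for d ≤ -2 A reads b_a at negative (wrapped) indices.


-- ===== PORT A =====
-- the while loop of A: state (res, bidx, cidx, blen); fuel bounds the iteration count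
def pvALoop (b_a c_a : List Int) (dd : Int) : Nat → Int → Int → Int → Int → Int
  | 0, res, _, _, _ => res
  | fuel + 1, res, bidx, cidx, blen =>
    if bidx < (b_a.length : Int) then
      let blen2 := if PySem.Int.mod blen dd = 0 then blen + 1
                   else (PySem.Int.floordiv blen dd + 1) * dd + 1
      if cidx + blen2 - blen > (c_a.length : Int) then res
      else
        let rng := PySem.List.pyRange cidx (cidx + (blen2 - blen)) 1
        let csum := rng.foldl (fun s i => s + PySem.List.pyGetD c_a i 0) 0
        if PySem.List.pyGetD b_a bidx 0 ≤ csum then res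
        else pvALoop b_a c_a dd fuel (res + PySem.List.pyGetD b_a bidx 0 - csum)
               (bidx + 1) (cidx + (rng.length : Int)) blen2
    else res

def Boboniu_Chats_with_Du (n : Int) (d : Int) (m : Int) (a_a : List Int) : Int :=
  let st := a_a.foldl
    (fun (st : List Int × List Int × Int) a =>
      if m < a then (st.1 ++ [a], st.2.1, st.2.2)
      else (st.1, st.2.1 ++ [a], st.2.2 + a)) ([], [], 0)
  if st.1 = [] then st.2.2
  else
    let b_a := PySem.List.sorted st.1 (fun x => x) true
    let c_a := PySem.List.sorted st.2.1 (fun x => x) false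
    let dd := d + 1
    let blen : Int := (b_a.length : Int)
    let bidx := PySem.Int.floordiv blen dd + (if 0 < PySem.Int.mod blen dd then 1 else 0)
    let res := (PySem.List.pyRange 0 bidx 1).foldl
      (fun s i => s + PySem.List.pyGetD b_a i 0) st.2.2
    pvALoop b_a c_a dd b_a.length res bidx 0 blen

-- ===== PORT B =====
-- pvPfx acc xs = the Python prefix-sum list [acc, acc+xs0, acc+xs0+xs1, ...]
def pvPfx (acc : Int) : List Int → List Int
  | [] => [acc]
  | x :: xs => acc :: pvPfx (acc + x) xs

-- the for-k loop of B with early break, folding the best candidate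
def pvBLoop (pb ps : List Int) (ts dd blen clen : Int) : List Int → Option Int → Option Int
  | [], best => best
  | k :: ks, best =>
    let removed := max 0 ((k - 1) * dd + 1 - blen)
    if removed > clen then best
    else
      let cand := PySem.List.pyGetD pb k 0 + ts - PySem.List.pyGetD ps removed 0
      let best' := match best with
        | none => some cand
        | some v => if v < cand then some cand else some v
      pvBLoop pb ps ts dd blen clen ks best'

def Boboniu_Chats_with_Du_alt (n : Int) (d : Int) (m : Int) (a_a : List Int) : Int :=
  let big := PySem.List.sorted (a_a.filter (fun a => decide (m < a))) (fun x => x) true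
  let small := PySem.List.sorted (a_a.filter (fun a => decide (a ≤ m))) (fun x => x) false
  let pb := pvPfx 0 big
  let ps := pvPfx 0 small
  let ts := PySem.List.pyGetD ps (-1) 0
  if big = [] then ts
  else
    let dd := d + 1
    let blen : Int := (big.length : Int)
    let clen : Int := (small.length : Int)
    let k0 := -(PySem.Int.floordiv (-blen) dd)
    (pvBLoop pb ps ts dd blen clen (PySem.List.pyRange k0 (blen + 1) 1) none).getD 0

-- ===== PRECONDITION & SPEC =====
-- d counts muzzled days; Pre_ keeps the natural domain d ≥ 0: at d = -1 A raises
-- ZeroDivisionError (when some element exceeds m), and for d ≤ -2 A's day arithmetic goes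
-- negative and it reads b_a at negative (Python-wrapped) indices — accidental values.
def Pre_Boboniu_Chats_with_Du (n : Int) (d : Int) (m : Int) (a_a : List Int) : Prop := 0 ≤ d
instance (n : Int) (d : Int) (m : Int) (a_a : List Int) : Decidable (Pre_Boboniu_Chats_with_Du n d m a_a) := by unfold Pre_Boboniu_Chats_with_Du; infer_instance

def pvWitness_Boboniu_Chats_with_Du : Int × Int × Int × List Int := (0, 1, 5, [10, 3, 2, 7])

def Spec_Boboniu_Chats_with_Du (n : Int) (d : Int) (m : Int) (a_a : List Int) (out : Int) : Prop := out = Boboniu_Chats_with_Du_alt n d m a_a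
instance (n : Int) (d : Int) (m : Int) (a_a : List Int) (out : Int) : Decidable (Spec_Boboniu_Chats_with_Du n d m a_a out) := by unfold Spec_Boboniu_Chats_with_Du; infer_instance

-- ===== CLAIM (what is proved, stated in full; the proofs are below) =====
def Claim_equal_Boboniu_Chats_with_Du : Prop := ∀ (n : Int) (d : Int) (m : Int) (a_a : List Int), Dom_Boboniu_Chats_with_Du n d m a_a → Pre_Boboniu_Chats_with_Du n d m a_a → Spec_Boboniu_Chats_with_Du n d m a_a (Boboniu_Chats_with_Du n d m a_a)

-- ===== LEMMAS AND PROOFS =====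

-- prefix sum of the first i elements
def pvS (xs : List Int) (i : Nat) : Int := (xs.take i).sum

-- smalls removed when k bigs are taken (0 while (k-1)*dN+1 ≤ bl)
def pvRem (bl dN k : Nat) : Nat := (k - 1) * dN + 1 - bl

-- score when exactly k bigs are taken
def pvCand (b c : List Int) (dN : Nat) (k : Nat) : Int :=
  pvS b k + c.sum - pvS c (pvRem b.length dN k)

-- abstract form of A's while loop
def pvGreedy (b c : List Int) (dN : Nat) (k : Nat) : Int :=
  if h : k < b.length ∧ pvRem b.length dN (k + 1) ≤ c.length then
    if pvCand b c dN (k + 1) ≤ pvCand b c dN k then pvCand b c dN k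
    else pvGreedy b c dN (k + 1)
  else pvCand b c dN k
termination_by b.length - k
decreasing_by omega

-- abstract form of B's loop: max of v and all candidates from k up to the break
def pvMaxFrom (b c : List Int) (dN : Nat) (k : Nat) (v : Int) : Int :=
  if h : k ≤ b.length ∧ pvRem b.length dN k ≤ c.length then
    pvMaxFrom b c dN (k + 1) (max v (pvCand b c dN k))
  else v
termination_by b.length + 1 - k
decreasing_by omega


-- ---------- prefix-sum facts ----------

theorem pvS_succ (xs : List Int) (i : Nat) (h : i < xs.length) :
    pvS xs (i + 1) = pvS xs i + xs[i] := List.sum_take_succ xs i h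

theorem pv_mono_le (cs : List Int) (hc : cs.Pairwise (fun x y => x ≤ y)) (i j : Nat)
    (hij : i ≤ j) (hj : j < cs.length) : cs[i]'(by omega) ≤ cs[j] := by
  rcases Nat.eq_or_lt_of_le hij with h | h
  · subst h; exact le_refl _
  · exact List.pairwise_iff_getElem.mp hc i j (by omega) hj h

theorem pv_mono_ge (bs : List Int) (hb : bs.Pairwise (fun x y => y ≤ x)) (i j : Nat)
    (hij : i ≤ j) (hj : j < bs.length) : bs[j] ≤ bs[i]'(by omega) := by
  rcases Nat.eq_or_lt_of_le hij with h | h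
  · subst h; exact le_refl _
  · exact List.pairwise_iff_getElem.mp hb i j (by omega) hj h

-- sum of the segment [p, q) of an ascending list is at most (q-p) times its last element
theorem pv_seg_upper (cs : List Int) (hc : cs.Pairwise (fun x y => x ≤ y)) (p q : Nat)
    (hpq : p < q) (hq : q ≤ cs.length) :
    pvS cs q - pvS cs p ≤ ((q : Int) - (p : Int)) * cs[q - 1]'(by omega) := by
  induction q with
  | zero => omega
  | succ q ih =>
    have e : pvS cs (q + 1) = pvS cs q + cs[q] := pvS_succ cs q (by omega)
    rcases Nat.lt_or_ge p q with h | h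
    · have ihh := ih (by omega) (by omega)
      have mono : cs[q - 1]'(by omega) ≤ cs[q] := pv_mono_le cs hc (q-1) q (by omega) (by omega)
      have h2 : ((q : Int) - (p : Int)) * cs[q - 1]'(by omega) ≤ ((q : Int) - (p : Int)) * cs[q] :=
        mul_le_mul_of_nonneg_left mono (by omega)
      push_cast
      calc pvS cs (q + 1) - pvS cs p = (pvS cs q - pvS cs p) + cs[q] := by rw [e]; ring
        _ ≤ ((q : Int) - (p : Int)) * cs[q - 1]'(by omega) + cs[q] := add_le_add ihh (le_refl _)
        _ ≤ ((q : Int) - (p : Int)) * cs[q] + cs[q] := add_le_add h2 (le_refl _)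
        _ = ((q : Int) + 1 - (p : Int)) * cs[q] := by ring
    · have hpq2 : p = q := by omega
      subst hpq2
      push_cast
      calc pvS cs (p + 1) - pvS cs p = cs[p] := by rw [e]; ring
        _ ≤ ((p : Int) + 1 - (p : Int)) * cs[p] := le_of_eq (by ring)

-- sum of the segment [q, q+n) of an ascending list is at least n times cs[q-1]
theorem pv_seg_lower (cs : List Int) (hc : cs.Pairwise (fun x y => x ≤ y)) (q n : Nat)
    (h : q + n ≤ cs.length) (h1 : 1 ≤ q) :
    (n : Int) * cs[q - 1]'(by omega) ≤ pvS cs (q + n) - pvS cs q := by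
  induction n with
  | zero => simp
  | succ n ih =>
    have e : pvS cs (q + n + 1) = pvS cs (q + n) + cs[q + n]'(by omega) := pvS_succ cs (q+n) (by omega)
    have mono : cs[q - 1]'(by omega) ≤ cs[q + n]'(by omega) := pv_mono_le cs hc (q-1) (q+n) (by omega) (by omega)
    have ihh := ih (by omega)
    have e2 : q + (n + 1) = q + n + 1 := rfl
    rw [e2]
    push_cast
    calc ((n : Int) + 1) * cs[q - 1]'(by omega) = (n : Int) * cs[q - 1]'(by omega) + cs[q - 1]'(by omega) := by ring
      _ ≤ (pvS cs (q + n) - pvS cs q) + cs[q + n]'(by omega) := add_le_add ihh mono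
      _ = pvS cs (q + n + 1) - pvS cs q := by rw [e]; ring

theorem pv_mul_pred (k dN : Nat) (hk : 1 ≤ k) : k * dN = (k - 1) * dN + dN := by
  cases k with
  | zero => omega
  | succ k' => simp [Nat.succ_mul]

-- ---------- the crux: once a step stops paying, the next step does not pay either ----------

theorem pv_gain_step (bs cs : List Int) (m : Int) (dN k : Nat)
    (hb : bs.Pairwise (fun x y => y ≤ x)) (hc : cs.Pairwise (fun x y => x ≤ y))
    (hbm : ∀ x ∈ bs, m < x) (hcm : ∀ y ∈ cs, y ≤ m)
    (hd : 1 ≤ dN) (hk1 : 1 ≤ k) (hkd : bs.length ≤ k * dN)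
    (hkb : k + 1 < bs.length) (hfeas : pvRem bs.length dN (k + 2) ≤ cs.length)
    (h1 : pvCand bs cs dN (k + 1) ≤ pvCand bs cs dN k) :
    pvCand bs cs dN (k + 2) ≤ pvCand bs cs dN (k + 1) := by
  have e1 : k * dN = (k - 1) * dN + dN := pv_mul_pred k dN hk1
  have e2 : (k + 1) * dN = k * dN + dN := Nat.succ_mul k dN
  have e3 : (k + 2) * dN = (k + 1) * dN + dN := Nat.succ_mul (k+1) dN
  have hp : pvRem bs.length dN k = (k - 1) * dN + 1 - bs.length := rfl
  have hqe : pvRem bs.length dN (k + 1) = k * dN + 1 - bs.length := rfl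
  have hte : pvRem bs.length dN (k + 2) = (k + 1) * dN + 1 - bs.length := rfl
  set bl := bs.length with hbl
  set cl := cs.length with hcl
  set p := pvRem bl dN k with hpd
  set q := pvRem bl dN (k + 1) with hqd
  set t := pvRem bl dN (k + 2) with htd
  set A := (k - 1) * dN with hA
  set B := k * dN with hB
  set C := (k + 1) * dN with hC
  have hq1 : 1 ≤ q := by omega
  have hqp : p ≤ q := by omega
  have hrd : q - p ≤ dN := by omega
  have hr1 : 1 ≤ q - p := by omega
  have ht : t = q + dN := by omega
  have hqcl : q ≤ cl := by omega
  have hbk : pvS bs (k + 1) = pvS bs k + bs[k]'(by omega) := pvS_succ bs k (by omega)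
  have hbk1 : pvS bs (k + 2) = pvS bs (k + 1) + bs[k + 1]'(by omega) := pvS_succ bs (k+1) (by omega)
  have seg1 : pvS cs q - pvS cs p ≤ ((q : Int) - (p : Int)) * cs[q - 1]'(by omega) :=
    pv_seg_upper cs hc p q (by omega) (by omega)
  have seg2 : (dN : Int) * cs[q - 1]'(by omega) ≤ pvS cs (q + dN) - pvS cs q :=
    pv_seg_lower cs hc q dN (by omega) hq1
  have hM : cs[q - 1]'(by omega) ≤ m := hcm _ (List.getElem_mem _)
  have hmbk : m < bs[k]'(by omega) := hbm _ (List.getElem_mem _)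
  have hbb : bs[k + 1]'(by omega) ≤ bs[k]'(by omega) := pv_mono_ge bs hb k (k+1) (by omega) (by omega)
  have h1' : bs[k]'(by omega) ≤ pvS cs q - pvS cs p := by
    simp only [pvCand, ← hbl, ← hpd, ← hqd] at h1
    omega
  have hMpos : 0 < cs[q - 1]'(by omega) := by
    by_contra hneg
    push_neg at hneg
    have h2 : ((q : Int) - (p : Int)) * cs[q - 1]'(by omega) ≤ 1 * cs[q - 1]'(by omega) :=
      mul_le_mul_of_nonpos_right (by omega) hneg
    have h3 : bs[k]'(by omega) ≤ m := by
      refine le_trans (le_trans h1' seg1) (le_trans h2 ?_)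
      rw [one_mul]; exact hM
    exact absurd hmbk (not_lt.mpr h3)
  have hrle : ((q : Int) - (p : Int)) * cs[q - 1]'(by omega) ≤ (dN : Int) * cs[q - 1]'(by omega) :=
    mul_le_mul_of_nonneg_right (by omega) (le_of_lt hMpos)
  have goal' : bs[k + 1]'(by omega) ≤ pvS cs t - pvS cs q := by
    rw [ht]
    exact le_trans hbb (le_trans h1' (le_trans seg1 (le_trans hrle seg2)))
  simp only [pvCand, ← hbl, ← hqd, ← htd]
  omega

-- once a step stops paying, no later candidate exceeds the current best
theorem pv_maxFrom_stuck (bs cs : List Int) (m : Int) (dN : Nat)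
    (hb : bs.Pairwise (fun x y => y ≤ x)) (hc : cs.Pairwise (fun x y => x ≤ y))
    (hbm : ∀ x ∈ bs, m < x) (hcm : ∀ y ∈ cs, y ≤ m) (hd : 1 ≤ dN) :
    ∀ (fuel j : Nat) (v : Int), bs.length ≤ fuel + j → 1 ≤ j → bs.length ≤ j * dN →
      pvCand bs cs dN (j + 1) ≤ pvCand bs cs dN j → pvCand bs cs dN j ≤ v →
      pvMaxFrom bs cs dN (j + 1) v = v := by
  intro fuel
  induction fuel with
  | zero =>
    intro j v hfuel hj1 hjd hstop hv
    rw [pvMaxFrom, dif_neg (by omega)]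
  | succ fuel ih =>
    intro j v hfuel hj1 hjd hstop hv
    rw [pvMaxFrom]
    by_cases hg : j + 1 ≤ bs.length ∧ pvRem bs.length dN (j + 1) ≤ cs.length
    · rw [dif_pos hg]
      rw [max_eq_left (le_trans hstop hv)]
      by_cases hg2 : j + 1 + 1 ≤ bs.length ∧ pvRem bs.length dN (j + 1 + 1) ≤ cs.length
      · have hjd' : bs.length ≤ (j + 1) * dN :=
          le_trans hjd (Nat.mul_le_mul_right dN (by omega))
        have gain : pvCand bs cs dN (j + 2) ≤ pvCand bs cs dN (j + 1) :=
          pv_gain_step bs cs m dN j hb hc hbm hcm hd hj1 hjd (by omega) hg2.2 hstop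
        exact ih (j + 1) v (by omega) (by omega) hjd' gain (le_trans hstop hv)
      · rw [pvMaxFrom, dif_neg hg2]
    · rw [dif_neg hg]

-- A's greedy stop returns the maximum candidate
theorem pv_greedy_eq_maxFrom (bs cs : List Int) (m : Int) (dN : Nat)
    (hb : bs.Pairwise (fun x y => y ≤ x)) (hc : cs.Pairwise (fun x y => x ≤ y))
    (hbm : ∀ x ∈ bs, m < x) (hcm : ∀ y ∈ cs, y ≤ m) (hd : 1 ≤ dN) :
    ∀ (fuel k : Nat), bs.length ≤ fuel + k → 1 ≤ k → bs.length ≤ k * dN →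
      pvGreedy bs cs dN k = pvMaxFrom bs cs dN (k + 1) (pvCand bs cs dN k) := by
  intro fuel
  induction fuel with
  | zero =>
    intro k hfuel hk1 hkd
    rw [pvGreedy, dif_neg (by omega), pvMaxFrom, dif_neg (by omega)]
  | succ fuel ih =>
    intro k hfuel hk1 hkd
    rw [pvGreedy]
    by_cases hg : k < bs.length ∧ pvRem bs.length dN (k + 1) ≤ cs.length
    · rw [dif_pos hg]
      by_cases hs : pvCand bs cs dN (k + 1) ≤ pvCand bs cs dN k
      · rw [if_pos hs]
        exact (pv_maxFrom_stuck bs cs m dN hb hc hbm hcm hd bs.length k _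
          (by omega) hk1 hkd hs (le_refl _)).symm
      · rw [if_neg hs, pvMaxFrom, dif_pos (by omega : k + 1 ≤ bs.length ∧ pvRem bs.length dN (k + 1) ≤ cs.length)]
        rw [max_eq_right (le_of_lt (not_le.mp hs))]
        exact ih (k + 1) (by omega) (by omega)
          (le_trans hkd (Nat.mul_le_mul_right dN (by omega)))
    · rw [dif_neg hg, pvMaxFrom, dif_neg (by omega)]

-- ---------- port-side bookkeeping lemmas ----------

theorem pv_fold_filter (m : Int) (xs : List Int) (acc : List Int × List Int × Int) :
    xs.foldl (fun (st : List Int × List Int × Int) a =>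
      if m < a then (st.1 ++ [a], st.2.1, st.2.2)
      else (st.1, st.2.1 ++ [a], st.2.2 + a)) acc
    = (acc.1 ++ xs.filter (fun a => decide (m < a)),
       acc.2.1 ++ xs.filter (fun a => decide (a ≤ m)),
       acc.2.2 + (xs.filter (fun a => decide (a ≤ m))).sum) := by
  induction xs generalizing acc with
  | nil => simp
  | cons a t ih =>
    rw [List.foldl_cons]
    by_cases h : m < a
    · rw [if_pos h, ih]
      have h2 : ¬ (a ≤ m) := not_le.mpr h
      simp [h, h2]
    · rw [if_neg h, ih]
      have h2 : a ≤ m := not_lt.mp h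
      simp [h, h2]
      ring

theorem pv_fold_range_sum (xs : List Int) (p j : Nat) (init : Int) (h : p + j ≤ xs.length) :
    (PySem.List.pyRange (p : Int) ((p : Int) + (j : Int)) 1).foldl
      (fun s i => s + PySem.List.pyGetD xs i 0) init
    = init + (pvS xs (p + j) - pvS xs p) := by
  induction j with
  | zero =>
    rw [show ((p : Int) + ((0 : Nat) : Int)) = (p : Int) by push_cast; ring]
    rw [PySem.List.pyRange_one_eq_nil (by omega)]
    simp
  | succ j ih =>
    rw [show ((p : Int) + ((j + 1 : Nat) : Int)) = ((p : Int) + (j : Int)) + 1 by push_cast; ring]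
    rw [PySem.List.pyRange_one_succ_right (by omega)]
    rw [List.foldl_append, ih (by omega)]
    simp only [List.foldl_cons, List.foldl_nil]
    rw [show ((p : Int) + (j : Int)) = ((p + j : Nat) : Int) by push_cast; ring]
    rw [PySem.List.pyGetD_natCast, List.getD_eq_getElem xs 0 (by omega)]
    rw [show p + (j + 1) = (p + j) + 1 from rfl, pvS_succ xs (p + j) (by omega)]
    ring

theorem pv_pfx_ne_nil (acc : Int) (xs : List Int) : pvPfx acc xs ≠ [] := by
  cases xs <;> simp [pvPfx]

theorem pv_pfx_getLast (acc : Int) (xs : List Int) :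
    (pvPfx acc xs).getLast (pv_pfx_ne_nil acc xs) = acc + xs.sum := by
  induction xs generalizing acc with
  | nil => simp [pvPfx]
  | cons x t ih =>
    have h : pvPfx (acc + x) t ≠ [] := pv_pfx_ne_nil _ _
    calc (pvPfx acc (x :: t)).getLast (pv_pfx_ne_nil acc (x :: t))
        = (pvPfx (acc + x) t).getLast h := by
          simp only [pvPfx]
          exact List.getLast_cons h
      _ = (acc + x) + t.sum := ih (acc + x)
      _ = acc + (x :: t).sum := by simp; ring

theorem pv_pfx_last (acc : Int) (xs : List Int) :
    PySem.List.pyGetD (pvPfx acc xs) (-1) 0 = acc + xs.sum := by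
  rw [PySem.List.pyGetD_neg_one _ 0 (pv_pfx_ne_nil acc xs)]
  exact pv_pfx_getLast acc xs

theorem pv_pfx_getD (acc : Int) (xs : List Int) (k : Nat) (hk : k ≤ xs.length) :
    PySem.List.pyGetD (pvPfx acc xs) ((k : Nat) : Int) 0 = acc + pvS xs k := by
  rw [PySem.List.pyGetD_natCast]
  induction xs generalizing acc k with
  | nil =>
    have : k = 0 := by simpa using hk
    subst this
    simp [pvPfx, pvS]
  | cons x t ih =>
    cases k with
    | zero => simp [pvPfx, pvS]
    | succ k =>
      have hk' : k ≤ t.length := by simpa using hk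
      simp only [pvPfx, List.getD_cons_succ]
      rw [ih (acc + x) k hk']
      simp [pvS]
      ring

theorem pv_cast_pred (k : Nat) (hk : 1 ≤ k) : ((k : Int) - 1) = ((k - 1 : Nat) : Int) := by omega

theorem pv_ceil (bl dN : Nat) (hbl : 1 ≤ bl) (hd : 1 ≤ dN) :
    ∃ K : Nat, (1 ≤ K ∧ K ≤ bl) ∧ (bl ≤ K * dN ∧ (K - 1) * dN + 1 ≤ bl) ∧
      K = bl / dN + (if 0 < bl % dN then 1 else 0) := by
  obtain ⟨f, r, hfr, hrlt, hf, hr0⟩ :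
      ∃ f r, f * dN + r = bl ∧ r < dN ∧ bl / dN = f ∧ bl % dN = r :=
    ⟨bl / dN, bl % dN, by rw [Nat.mul_comm]; exact Nat.div_add_mod bl dN,
      Nat.mod_lt _ (by omega), rfl, rfl⟩
  rw [hf, hr0]
  have hfle : f ≤ f * dN := Nat.le_mul_of_pos_right _ (by omega)
  by_cases hr : 0 < r
  · refine ⟨f + 1, ⟨by omega, by omega⟩, ⟨?_, ?_⟩, by rw [if_pos hr]⟩
    · have e : (f + 1) * dN = f * dN + dN := Nat.succ_mul _ _
      omega
    · have e : f + 1 - 1 = f := by omega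
      rw [e]; omega
  · have hf1 : 1 ≤ f := by
      rcases Nat.eq_zero_or_pos f with h0 | h0
      · subst h0; simp at hfr; omega
      · exact h0
    refine ⟨f, ⟨hf1, by omega⟩, ⟨by omega, ?_⟩, by rw [if_neg hr]; omega⟩
    have e : (f - 1) * dN + dN = f * dN := (pv_mul_pred _ _ hf1).symm
    omega

theorem pv_bidxA (bl dN : Nat) :
    PySem.Int.floordiv (bl : Int) (dN : Int)
      + (if 0 < PySem.Int.mod (bl : Int) (dN : Int) then 1 else 0)
    = ((bl / dN + (if 0 < bl % dN then 1 else 0) : Nat) : Int) := by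
  rw [PySem.Int.floordiv_natCast, PySem.Int.mod_natCast]
  by_cases h : 0 < bl % dN
  · rw [if_pos (by exact_mod_cast h), if_pos h]; push_cast; ring
  · rw [if_neg (by exact_mod_cast h), if_neg h]; push_cast; ring

theorem pv_k0B (bl dN K : Nat) (hd : 1 ≤ dN) (hK1 : 1 ≤ K)
    (hlow : (K - 1) * dN + 1 ≤ bl) (hup : bl ≤ K * dN) :
    -(PySem.Int.floordiv (-(bl : Int)) (dN : Int)) = (K : Int) := by
  refine (PySem.Int.neg_floordiv_neg_eq_iff_of_pos (by exact_mod_cast hd : (0:Int) < (dN:Int))).mpr ⟨?_, ?_⟩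
  · rw [pv_cast_pred K hK1]
    exact_mod_cast (by omega : (K - 1) * dN < bl)
  · exact_mod_cast hup

theorem pv_blen2 (bl dN k : Nat) (hd : 1 ≤ dN) (hk1 : 1 ≤ k) (hup : bl ≤ k * dN) :
    (if (max bl ((k - 1) * dN + 1)) % dN = 0 then (max bl ((k - 1) * dN + 1)) + 1
     else ((max bl ((k - 1) * dN + 1)) / dN + 1) * dN + 1) = k * dN + 1 := by
  have e1 : k * dN = (k - 1) * dN + dN := pv_mul_pred k dN hk1
  rcases Nat.lt_or_ge bl ((k - 1) * dN + 1) with h | h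
  · have hBe : max bl ((k - 1) * dN + 1) = (k - 1) * dN + 1 := max_eq_right (by omega)
    rcases Nat.eq_or_lt_of_le hd with h1 | h1
    · -- dN = 1
      rw [hBe, ← h1]
      simp [Nat.mod_one]
      omega
    · -- 2 ≤ dN
      have hmod : ((k - 1) * dN + 1) % dN = 1 := by
        rw [Nat.mul_comm (k - 1) dN, Nat.mul_add_mod]
        exact Nat.mod_eq_of_lt h1
      have hdiv : ((k - 1) * dN + 1) / dN = k - 1 := by
        rw [Nat.mul_comm (k - 1) dN, Nat.mul_add_div (by omega)]
        simp [Nat.div_eq_of_lt h1]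
      rw [hBe, if_neg (by omega), hdiv]
      have e2 : k - 1 + 1 = k := by omega
      rw [e2]
  · have hBe : max bl ((k - 1) * dN + 1) = bl := max_eq_left (by omega)
    obtain ⟨f, r, hfr, hrlt, hf, hr0⟩ :
        ∃ f r, f * dN + r = bl ∧ r < dN ∧ bl / dN = f ∧ bl % dN = r :=
      ⟨bl / dN, bl % dN, by rw [Nat.mul_comm]; exact Nat.div_add_mod bl dN,
        Nat.mod_lt _ (by omega), rfl, rfl⟩
    rw [hBe, hf, hr0]
    by_cases hr : r = 0
    · have hfk : f = k := by
        have hle : f ≤ k := by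
          by_contra hgt
          push_neg at hgt
          have h2 : (k + 1) * dN ≤ f * dN := Nat.mul_le_mul_right dN (by omega)
          have e2 : (k + 1) * dN = k * dN + dN := Nat.succ_mul _ _
          omega
        have hge : k ≤ f := by
          by_contra hgt
          push_neg at hgt
          have h2 : (f + 1) * dN ≤ k * dN := Nat.mul_le_mul_right dN (by omega)
          have e2 : (f + 1) * dN = f * dN + dN := Nat.succ_mul _ _
          omega
        omega
      subst hfk
      rw [if_pos hr]
      omega
    · have hfk : f = k - 1 := by
        have hle : f ≤ k - 1 := by
          by_contra hgt
          push_neg at hgt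
          have h2 : k * dN ≤ f * dN := Nat.mul_le_mul_right dN (by omega)
          omega
        have hge : k - 1 ≤ f := by
          by_contra hgt
          push_neg at hgt
          have h2 : (f + 1) * dN ≤ (k - 1) * dN := Nat.mul_le_mul_right dN (by omega)
          have e2 : (f + 1) * dN = f * dN + dN := Nat.succ_mul _ _
          omega
        omega
      rw [if_neg hr, hfk]
      have e2 : k - 1 + 1 = k := by omega
      rw [e2]

-- ---------- A's while loop computes pvGreedy ----------

theorem pv_aloop (bs cs : List Int) (dN : Nat) (hd : 1 ≤ dN) :
    ∀ (fuel k : Nat) (res : Int), bs.length ≤ fuel + k → 1 ≤ k → k ≤ bs.length →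
      bs.length ≤ k * dN → res = pvCand bs cs dN k →
      pvALoop bs cs (dN : Int) fuel res (k : Int) ((pvRem bs.length dN k : Nat) : Int)
        (max (bs.length : Int) (((k : Int) - 1) * (dN : Int) + 1))
      = pvGreedy bs cs dN k := by
  intro fuel
  induction fuel with
  | zero =>
    intro k res hfuel hk1 hkbl hkd hres
    rw [pvGreedy, dif_neg (by omega)]
    simp only [pvALoop]
    exact hres
  | succ fuel ih =>
    intro k res hfuel hk1 hkbl hkd hres
    have hmax : (max (bs.length : Int) (((k : Int) - 1) * (dN : Int) + 1))
        = ((max bs.length ((k - 1) * dN + 1) : Nat) : Int) := by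
      rw [pv_cast_pred k hk1]
      have e1 : ((k - 1 : Nat) : Int) * ((dN : Nat) : Int) = (((k - 1) * dN : Nat) : Int) := by
        push_cast; ring
      rw [e1]
      omega
    rw [hmax]
    by_cases hkb : k < bs.length
    case neg =>
      rw [pvGreedy, dif_neg (by omega)]
      simp only [pvALoop]
      rw [if_neg (by omega : ¬ ((k : Int) < (bs.length : Int)))]
      exact hres
    case pos =>
      have hrem0 : pvRem bs.length dN k = (k - 1) * dN + 1 - bs.length := rfl
      have hrem1 : pvRem bs.length dN (k + 1) = k * dN + 1 - bs.length := rfl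
      have hmul : k * dN = (k - 1) * dN + dN := pv_mul_pred k dN hk1
      simp only [pvALoop]
      rw [if_pos (by omega : (k : Int) < (bs.length : Int))]
      have hblen2 : (if PySem.Int.mod ((max bs.length ((k - 1) * dN + 1) : Nat) : Int) ((dN : Nat) : Int) = 0
                       then ((max bs.length ((k - 1) * dN + 1) : Nat) : Int) + 1
                       else (PySem.Int.floordiv ((max bs.length ((k - 1) * dN + 1) : Nat) : Int) ((dN : Nat) : Int) + 1) * ((dN : Nat) : Int) + 1)
          = ((k * dN + 1 : Nat) : Int) := by
        rw [PySem.Int.mod_natCast, PySem.Int.floordiv_natCast]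
        have hnat := pv_blen2 bs.length dN k hd hk1 hkd
        by_cases h0 : (max bs.length ((k - 1) * dN + 1)) % dN = 0
        · rw [if_pos (by exact_mod_cast h0)]
          rw [if_pos h0] at hnat
          exact_mod_cast hnat
        · rw [if_neg (by exact_mod_cast h0)]
          rw [if_neg h0] at hnat
          have : (((max bs.length ((k - 1) * dN + 1)) / dN : Nat) : Int) + 1 = (((max bs.length ((k - 1) * dN + 1)) / dN + 1 : Nat) : Int) := by push_cast; ring
          rw [this]
          have e2 : (((max bs.length ((k - 1) * dN + 1)) / dN + 1 : Nat) : Int) * ((dN : Nat) : Int) + 1 = ((((max bs.length ((k - 1) * dN + 1)) / dN + 1) * dN + 1 : Nat) : Int) := by push_cast; ring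
          rw [e2]
          exact_mod_cast hnat
      rw [hblen2]
      by_cases hfeas : pvRem bs.length dN (k + 1) ≤ cs.length
      case neg =>
        rw [if_pos (by omega :
          ((pvRem bs.length dN k : Nat) : Int) + ((k * dN + 1 : Nat) : Int) - ((max bs.length ((k - 1) * dN + 1) : Nat) : Int) > (cs.length : Int))]
        rw [pvGreedy, dif_neg (by omega)]
        exact hres
      case pos =>
        rw [if_neg (by omega :
          ¬ (((pvRem bs.length dN k : Nat) : Int) + ((k * dN + 1 : Nat) : Int) - ((max bs.length ((k - 1) * dN + 1) : Nat) : Int) > (cs.length : Int)))]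
        have hsplit : ((pvRem bs.length dN k : Nat) : Int) + (((k * dN + 1 : Nat) : Int) - ((max bs.length ((k - 1) * dN + 1) : Nat) : Int))
            = ((pvRem bs.length dN k : Nat) : Int) + ((pvRem bs.length dN (k + 1) - pvRem bs.length dN k : Nat) : Int) := by omega
        rw [hsplit]
        rw [pv_fold_range_sum cs (pvRem bs.length dN k) (pvRem bs.length dN (k + 1) - pvRem bs.length dN k) 0 (by omega)]
        have hidx : pvRem bs.length dN k + (pvRem bs.length dN (k + 1) - pvRem bs.length dN k) = pvRem bs.length dN (k + 1) := by omega
        rw [hidx]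
        rw [PySem.List.pyGetD_natCast, List.getD_eq_getElem bs 0 (by omega : k < bs.length)]
        have hcand : pvCand bs cs dN (k + 1)
            = pvCand bs cs dN k + bs[k] - (pvS cs (pvRem bs.length dN (k + 1)) - pvS cs (pvRem bs.length dN k)) := by
          simp only [pvCand]
          rw [pvS_succ bs k (by omega)]
          ring
        by_cases hstop : pvCand bs cs dN (k + 1) ≤ pvCand bs cs dN k
        case pos =>
          rw [if_pos (by omega : bs[k] ≤ 0 + (pvS cs (pvRem bs.length dN (k + 1)) - pvS cs (pvRem bs.length dN k)))]
          rw [pvGreedy, dif_pos ⟨hkb, hfeas⟩, if_pos hstop]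
          exact hres
        case neg =>
          rw [if_neg (by omega : ¬ (bs[k] ≤ 0 + (pvS cs (pvRem bs.length dN (k + 1)) - pvS cs (pvRem bs.length dN k))))]
          rw [pvGreedy, dif_pos ⟨hkb, hfeas⟩, if_neg hstop]
          rw [PySem.List.length_pyRange_one]
          have hcidx : ((pvRem bs.length dN k : Nat) : Int)
              + (((((pvRem bs.length dN k : Nat) : Int) + ((pvRem bs.length dN (k + 1) - pvRem bs.length dN k : Nat) : Int)) - ((pvRem bs.length dN k : Nat) : Int)).toNat : Int)
              = ((pvRem bs.length dN (k + 1) : Nat) : Int) := by omega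
          rw [hcidx]
          have hbidx : ((k : Int) + 1) = ((k + 1 : Nat) : Int) := by push_cast; ring
          rw [hbidx]
          have hblen' : ((k * dN + 1 : Nat) : Int)
              = max (bs.length : Int) ((((k + 1 : Nat) : Int) - 1) * ((dN : Nat) : Int) + 1) := by
            have e : (((k + 1 : Nat) : Int) - 1) = ((k : Nat) : Int) := by push_cast; ring
            rw [e]
            have e2 : ((k : Nat) : Int) * ((dN : Nat) : Int) = ((k * dN : Nat) : Int) := by push_cast; ring
            rw [e2]
            omega
          rw [hblen']
          exact ih (k + 1) _ (by omega) (by omega) (by omega)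
            (le_trans hkd (Nat.mul_le_mul_right dN (by omega)))
            (by omega)

-- ---------- B's loop computes pvMaxFrom ----------

theorem pv_bloop (bs cs : List Int) (dN : Nat) (hd : 1 ≤ dN) :
    ∀ (fuel k : Nat) (v : Int), bs.length + 1 ≤ fuel + k → 1 ≤ k →
      pvBLoop (pvPfx 0 bs) (pvPfx 0 cs) cs.sum (dN : Int) (bs.length : Int) (cs.length : Int)
        (PySem.List.pyRange (k : Int) ((bs.length : Int) + 1) 1) (some v)
      = some (pvMaxFrom bs cs dN k v) := by
  intro fuel
  induction fuel with
  | zero =>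
    intro k v hfuel hk1
    rw [PySem.List.pyRange_one_eq_nil (by omega)]
    rw [pvMaxFrom, dif_neg (by omega)]
    simp only [pvBLoop]
  | succ fuel ih =>
    intro k v hfuel hk1
    by_cases hkbl : k ≤ bs.length
    case pos =>
      rw [PySem.List.pyRange_one_cons (by omega)]
      simp only [pvBLoop]
      have hrem : max 0 (((k : Int) - 1) * ((dN : Nat) : Int) + 1 - (bs.length : Int))
          = ((pvRem bs.length dN k : Nat) : Int) := by
        have e0 : pvRem bs.length dN k = (k - 1) * dN + 1 - bs.length := rfl
        rw [pv_cast_pred k hk1]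
        have e1 : ((k - 1 : Nat) : Int) * ((dN : Nat) : Int) = (((k - 1) * dN : Nat) : Int) := by
          push_cast; ring
        rw [e1]
        omega
      rw [hrem]
      by_cases hfeas : pvRem bs.length dN k ≤ cs.length
      case pos =>
        rw [if_neg (by omega : ¬ (((pvRem bs.length dN k : Nat) : Int) > (cs.length : Int)))]
        rw [pv_pfx_getD 0 bs k hkbl, pv_pfx_getD 0 cs (pvRem bs.length dN k) hfeas]
        have hc : (0 + pvS bs k) + cs.sum - (0 + pvS cs (pvRem bs.length dN k)) = pvCand bs cs dN k := by
          simp only [pvCand]; ring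
        rw [hc]
        have hmaxif : (if v < pvCand bs cs dN k then some (pvCand bs cs dN k) else some v)
            = some (max v (pvCand bs cs dN k)) := by
          split_ifs with h <;> simp [max_def] <;> omega
        rw [hmaxif]
        have hnext : ((k : Int) + 1) = ((k + 1 : Nat) : Int) := by push_cast; ring
        rw [hnext]
        rw [ih (k + 1) (max v (pvCand bs cs dN k)) (by omega) (by omega)]
        conv_rhs => rw [pvMaxFrom]
        rw [dif_pos ⟨hkbl, hfeas⟩]
      case neg =>
        rw [if_pos (by omega : ((pvRem bs.length dN k : Nat) : Int) > (cs.length : Int))]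
        rw [pvMaxFrom, dif_neg (by omega)]
    case neg =>
      rw [PySem.List.pyRange_one_eq_nil (by omega)]
      rw [pvMaxFrom, dif_neg (by omega)]
      simp only [pvBLoop]

-- ===== VERDICT (by name: the statement is the Claim_ definition above) =====
theorem Boboniu_Chats_with_Du_spec : Claim_equal_Boboniu_Chats_with_Du := by
  intro n d m a_a hdom hpre
  have hd0 : (0 : Int) ≤ d := hpre
  unfold Spec_Boboniu_Chats_with_Du
  simp only [Boboniu_Chats_with_Du, Boboniu_Chats_with_Du_alt, pv_fold_filter, List.nil_append,
    zero_add]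
  set F1 := a_a.filter (fun a => decide (m < a)) with hF1
  set F2 := a_a.filter (fun a => decide (a ≤ m)) with hF2
  set b := PySem.List.sorted F1 (fun x => x) true with hbdef
  set c := PySem.List.sorted F2 (fun x => x) false with hcdef
  have hsumc : c.sum = F2.sum := List.Perm.sum_eq (PySem.List.sorted_perm F2 (fun x => x) false)
  by_cases hF1e : F1 = []
  · have hbe : b = [] := by
      rw [hbdef, hF1e]
      exact (PySem.List.sorted_eq_nil_iff [] (fun x => x) true).mpr rfl
    rw [if_pos hF1e, if_pos hbe, pv_pfx_last 0 c]
    omega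
  · have hbne : ¬ (b = []) := by
      rw [hbdef]
      intro h
      exact hF1e ((PySem.List.sorted_eq_nil_iff F1 (fun x => x) true).mp h)
    rw [if_neg hF1e, if_neg hbne]
    set dN := (d + 1).toNat with hdN
    have hdd : d + 1 = ((dN : Nat) : Int) := by omega
    have hd1 : 1 ≤ dN := by omega
    have hbl1 : 1 ≤ b.length := List.length_pos_of_ne_nil hbne
    obtain ⟨K, ⟨hK1, hKbl⟩, ⟨hKup, hKlow⟩, hKdef⟩ := pv_ceil b.length dN hbl1 hd1
    have hremK : pvRem b.length dN K = 0 := by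
      have e : pvRem b.length dN K = (K - 1) * dN + 1 - b.length := rfl
      omega
    -- side facts about the sorted lists
    have hbP : b.Pairwise (fun x y => y ≤ x) := by
      rw [hbdef]; simpa using PySem.List.sorted_pairwise_rev F1 (fun x => x)
    have hcP : c.Pairwise (fun x y => x ≤ y) := by
      rw [hcdef]; simpa using PySem.List.sorted_pairwise F2 (fun x => x)
    have hbm : ∀ x ∈ b, m < x := by
      intro x hx
      rw [hbdef] at hx
      have h2 := (PySem.List.mem_sorted F1 (fun y => y) true x).mp hx
      rw [hF1] at h2
      have h3 := List.mem_filter.mp h2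
      simpa using h3.2
    have hcm : ∀ y ∈ c, y ≤ m := by
      intro y hy
      rw [hcdef] at hy
      have h2 := (PySem.List.mem_sorted F2 (fun z => z) false y).mp hy
      rw [hF2] at h2
      have h3 := List.mem_filter.mp h2
      simpa using h3.2
    rw [hdd]
    -- A side: initial res and bidx
    rw [pv_bidxA b.length dN, ← hKdef]
    have hinit : (PySem.List.pyRange 0 ((K : Nat) : Int) 1).foldl
        (fun s i => s + PySem.List.pyGetD b i 0) F2.sum = F2.sum + (pvS b K - pvS b 0) := by
      have h := pv_fold_range_sum b 0 K F2.sum (by simpa using hKbl)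
      simpa using h
    rw [hinit]
    have hres0 : F2.sum + (pvS b K - pvS b 0) = pvCand b c dN K := by
      have h0 : pvS b 0 = 0 := rfl
      have h1 : pvS c 0 = 0 := rfl
      simp only [pvCand, hremK, h0, h1]
      omega
    rw [hres0]
    have hA : pvALoop b c ((dN : Nat) : Int) b.length (pvCand b c dN K) ((K : Nat) : Int) 0
        ((b.length : Nat) : Int) = pvGreedy b c dN K := by
      have hc0 : (0 : Int) = ((pvRem b.length dN K : Nat) : Int) := by rw [hremK]; norm_num
      have hblen0 : ((b.length : Nat) : Int)
          = max ((b.length : Nat) : Int) ((((K : Nat) : Int) - 1) * ((dN : Nat) : Int) + 1) := by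
        rw [pv_cast_pred K hK1]
        have e1 : ((K - 1 : Nat) : Int) * ((dN : Nat) : Int) = (((K - 1) * dN : Nat) : Int) := by
          push_cast; ring
        rw [e1]; omega
      rw [hc0]
      conv_lhs => rw [hblen0]
      exact pv_aloop b c dN hd1 b.length K (pvCand b c dN K) (by omega) hK1 hKbl hKup rfl
    rw [hA]
    -- B side
    rw [pv_k0B b.length dN K hd1 hK1 hKlow hKup]
    rw [PySem.List.pyRange_one_cons (by omega : ((K : Nat) : Int) < ((b.length : Nat) : Int) + 1)]
    simp only [pvBLoop]
    have hremKi : max 0 ((((K : Nat) : Int) - 1) * ((dN : Nat) : Int) + 1 - ((b.length : Nat) : Int))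
        = ((pvRem b.length dN K : Nat) : Int) := by
      have e0 : pvRem b.length dN K = (K - 1) * dN + 1 - b.length := rfl
      rw [pv_cast_pred K hK1]
      have e1 : ((K - 1 : Nat) : Int) * ((dN : Nat) : Int) = (((K - 1) * dN : Nat) : Int) := by
        push_cast; ring
      rw [e1]; omega
    rw [hremKi]
    rw [if_neg (by omega : ¬ (((pvRem b.length dN K : Nat) : Int) > ((c.length : Nat) : Int)))]
    rw [pv_pfx_last 0 c, zero_add c.sum]
    rw [pv_pfx_getD 0 b K hKbl, pv_pfx_getD 0 c (pvRem b.length dN K) (by omega)]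
    have hcK : (0 + pvS b K) + c.sum - (0 + pvS c (pvRem b.length dN K))
        = pvCand b c dN K := by
      simp only [pvCand]; ring
    rw [hcK]
    rw [show ((K : Nat) : Int) + 1 = ((K + 1 : Nat) : Int) by push_cast; ring]
    rw [pv_bloop b c dN hd1 b.length (K + 1) (pvCand b c dN K) (by omega) (by omega)]
    simp only [Option.getD_some]
    exact pv_greedy_eq_maxFrom b c m dN hbP hcP hbm hcm hd1 b.length K (by omega) hK1 hKup
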